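-- pv_equiv track=rewrite | github.com/GiyoXD/streamlit_invoice_ui | invoice_gen/docs/examples/template_state_column_mapping_example.py | generate_column_mapping_from_filtered_columns
-- ===== SOURCE A (Python) =====
-- def generate_column_mapping_from_filtered_columns(
--     template_columns: list,
--     filtered_columns: list
-- ) -> dict:
--     """
--     Helper function to automatically generate column mapping.
--
--     Args:
--         template_columns: List of all column IDs from template
--                          Example: ['col_static', 'col_po', 'col_item', ...]
--         filtered_columns: List of column IDs after filtering
--                          Example: ['col_static', 'col_po', 'col_desc', ...]
--
--     Returns:
--         Column mapping dict {template_col_index: output_col_index or None}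
--     """
--     mapping = {}
--     output_index = 1
--
--     for template_index, col_id in enumerate(template_columns, start=1):
--         if col_id in filtered_columns:
--             # Column is kept - map to current output position
--             mapping[template_index] = output_index
--             output_index += 1
--         else:
--             # Column is removed - map to None
--             mapping[template_index] = None
--
--     return mapping
-- ===== SOURCE B (Python) =====
-- def generate_column_mapping_from_filtered_columns(
--     template_columns: list,
--     filtered_columns: list
-- ) -> dict:
--     # Prefix-table strategy: precompute kept-flags (via a set) and a
--     # cumulative kept-count array, then build the mapping in one comprehension.
--     kept = set(filtered_columns)
--     flags = [c in kept for c in template_columns]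
--     cum = []
--     total = 0
--     for fl in flags:
--         total += fl
--         cum.append(total)
--     return {i: (c if fl else None)
--             for i, (fl, c) in enumerate(zip(flags, cum), start=1)}
-- ===== Notes on version B (the rewrite author's own statement) =====
-- stated objective: faster
-- what changed: Replaces A's single loop with a running counter and a repeated linear list membership test by a precomputed set of kept columns, a boolean flags list, and a cumulative kept-count prefix array zipped into the mapping in a final comprehension.
import Mathlib
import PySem

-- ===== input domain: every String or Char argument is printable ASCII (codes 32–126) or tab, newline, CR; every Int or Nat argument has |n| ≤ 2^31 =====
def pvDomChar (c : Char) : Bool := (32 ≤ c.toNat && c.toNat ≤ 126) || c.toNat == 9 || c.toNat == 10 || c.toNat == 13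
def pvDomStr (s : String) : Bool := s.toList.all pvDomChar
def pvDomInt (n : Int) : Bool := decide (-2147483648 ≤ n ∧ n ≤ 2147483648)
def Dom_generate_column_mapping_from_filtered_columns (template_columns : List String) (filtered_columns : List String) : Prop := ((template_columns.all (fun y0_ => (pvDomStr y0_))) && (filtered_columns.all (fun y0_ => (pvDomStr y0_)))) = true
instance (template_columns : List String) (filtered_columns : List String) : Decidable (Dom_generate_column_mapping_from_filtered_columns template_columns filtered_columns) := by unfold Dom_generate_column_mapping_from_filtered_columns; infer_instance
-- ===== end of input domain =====

-- B replaces A's running counter + repeated list membership by a kept-set, a flags list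
-- and a precomputed cumulative-count array consulted in a final zip pass (objective: faster, set membership + prefix table remove the inner list scan).

-- ===== PORT A =====
def generate_column_mapping_from_filtered_columns (template_columns : List String) (filtered_columns : List String) : List (Int × Option Int) :=
  -- mapping = {}; output_index = 1; for template_index, col_id in enumerate(template_columns, 1): ...
  ((PySem.List.enumerate template_columns 1).foldl
    (fun (st : PySem.Dict Int (Option Int) × Int) p =>
      if filtered_columns.contains p.2 then (st.1.insert p.1 (some st.2), st.2 + 1)
      else (st.1.insert p.1 none, st.2))
    (PySem.Dict.empty, 1)).1.items

-- ===== PORT B =====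
def generate_column_mapping_from_filtered_columns_alt (template_columns : List String) (filtered_columns : List String) : List (Int × Option Int) :=
  let kept : PySem.Set String := PySem.Set.ofList filtered_columns
  let flags : List Bool := template_columns.map (fun c => PySem.Set.contains kept c)
  let cum : List Int :=
    (flags.foldl (fun (st : List Int × Int) fl =>
        (st.1 ++ [st.2 + (if fl then 1 else 0)], st.2 + (if fl then 1 else 0))) ([], 0)).1
  (PySem.List.enumerate (flags.zip cum) 1).map (fun p => (p.1, if p.2.1 then some p.2.2 else none))

-- ===== PRECONDITION & SPEC =====
def Spec_generate_column_mapping_from_filtered_columns (template_columns : List String) (filtered_columns : List String) (out : List (Int × Option Int)) : Prop := out = generate_column_mapping_from_filtered_columns_alt template_columns filtered_columns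
instance (template_columns : List String) (filtered_columns : List String) (out : List (Int × Option Int)) : Decidable (Spec_generate_column_mapping_from_filtered_columns template_columns filtered_columns out) := by unfold Spec_generate_column_mapping_from_filtered_columns; infer_instance

-- ===== CLAIM (what is proved, stated in full; the proofs are below) =====
def Claim_equal_generate_column_mapping_from_filtered_columns : Prop := ∀ (template_columns : List String) (filtered_columns : List String), Dom_generate_column_mapping_from_filtered_columns template_columns filtered_columns → Spec_generate_column_mapping_from_filtered_columns template_columns filtered_columns (generate_column_mapping_from_filtered_columns template_columns filtered_columns)

-- ===== LEMMAS AND PROOFS =====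

/-- Reference recursion both ports are reduced to. -/
def pvRec (f : List String) : List String → Int → Int → List (Int × Option Int)
  | [], _, _ => []
  | c :: r, ti, oi =>
    if f.contains c then (ti, some oi) :: pvRec f r (ti + 1) (oi + 1)
    else (ti, none) :: pvRec f r (ti + 1) oi

/-- Prefix sums of the kept-flags, starting from s. -/
def pvSums (s : Int) : List Bool → List Int
  | [] => []
  | b :: bs => (s + (if b then 1 else 0)) :: pvSums (s + (if b then 1 else 0)) bs

lemma pv_cum_foldl (flags : List Bool) (acc : List Int) (s : Int) :
    (flags.foldl (fun (st : List Int × Int) fl =>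
        (st.1 ++ [st.2 + (if fl then 1 else 0)], st.2 + (if fl then 1 else 0))) (acc, s)).1
      = acc ++ pvSums s flags := by
  induction flags generalizing acc s with
  | nil => simp [pvSums]
  | cons b bs ih => simp [List.foldl, pvSums, ih]

lemma pv_b_eq (f : List String) (t : List String) (ti s : Int) :
    (PySem.List.enumerate
        ((t.map (fun c => PySem.Set.contains (PySem.Set.ofList f) c)).zip
          (pvSums s (t.map (fun c => PySem.Set.contains (PySem.Set.ofList f) c)))) ti).map
      (fun p => (p.1, if p.2.1 then some p.2.2 else none))
      = pvRec f t ti (s + 1) := by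
  induction t generalizing ti s with
  | nil => simp [pvRec, pvSums]
  | cons c r ih =>
    have ih1 := ih (ti + 1) (s + 1)
    have ih2 := ih (ti + 1) s
    by_cases h : c ∈ f <;>
      simp_all [pvSums, PySem.List.enumerate_cons, pvRec, List.zip]

lemma pv_a_loop (f : List String) (t : List String) (d : PySem.Dict Int (Option Int)) (ti oi : Int)
    (hd : ∀ k, ti ≤ k → d.contains k = false) :
    ((PySem.List.enumerate t ti).foldl
        (fun (st : PySem.Dict Int (Option Int) × Int) p =>
          if f.contains p.2 then (st.1.insert p.1 (some st.2), st.2 + 1)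
          else (st.1.insert p.1 none, st.2))
        (d, oi)).1.items
      = d.items ++ pvRec f t ti oi := by
  induction t generalizing d ti oi with
  | nil => simp [pvRec, PySem.List.enumerate]
  | cons c r ih =>
    rw [PySem.List.enumerate_cons]
    have hfresh : ∀ (v : Option Int) (k : Int), ti + 1 ≤ k → (d.insert ti v).contains k = false := by
      intro v k hk
      rw [PySem.Dict.contains_insert]
      have h1 : (k == ti) = false := by simp; omega
      have h2 : d.contains k = false := hd k (by omega)
      simp [h1, h2]
    have hnot : d.contains ti = false := hd ti le_rfl
    by_cases h : f.contains c
    · have h' : c ∈ f := by simpa using h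
      simp only [List.foldl, h, if_pos]
      rw [ih (d.insert ti (some oi)) (ti + 1) (oi + 1) (hfresh _),
        PySem.Dict.items_insert_of_not_contains _ _ hnot]
      simp [pvRec, h']
    · have h' : c ∉ f := by simpa using h
      simp only [List.foldl, h, if_neg, Bool.false_eq_true, not_false_iff]
      rw [ih (d.insert ti none) (ti + 1) oi (hfresh _),
        PySem.Dict.items_insert_of_not_contains _ _ hnot]
      simp [pvRec, h']

-- ===== VERDICT (by name: the statement is the Claim_ definition above) =====
theorem generate_column_mapping_from_filtered_columns_spec : Claim_equal_generate_column_mapping_from_filtered_columns := by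
  intro t f _
  unfold Spec_generate_column_mapping_from_filtered_columns
  simp only [generate_column_mapping_from_filtered_columns, generate_column_mapping_from_filtered_columns_alt]
  rw [pv_a_loop f t PySem.Dict.empty 1 1 (by intro k _; exact PySem.Dict.contains_empty _)]
  rw [pv_cum_foldl, List.nil_append]
  have hb := pv_b_eq f t 1 0
  norm_num at hb ⊢
  rw [hb]
  rfl
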